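-- pv_equiv track=rewrite | github.com/huy29433/IntroductoryPythonCourse | Woche7-Bonus/Aufgabe_5.py | findMatchesVersion3
-- ===== SOURCE A (Python) =====
-- def findMatchesVersion3(listOfSocks):
--     matches = [-1 for i in listOfSocks]
--     dictOfSocks = dict()
--
--     for i in range(0, len(listOfSocks)):
--         if matches[i] != -1:
--             continue
--         if listOfSocks[i] in dictOfSocks:
--             matches[dictOfSocks[listOfSocks[i]]] = i
--             matches[i] = dictOfSocks[listOfSocks[i]]
--             continue
--         else:
--             dictOfSocks[listOfSocks[i]] = i
--
--     return matches
-- ===== SOURCE B (Python) =====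
-- def findMatchesVersion3(listOfSocks):
--     # One pass records first and last occurrence index of each value;
--     # a second pass computes each entry by a per-index formula.
--     first = {}
--     last = {}
--     for i, v in enumerate(listOfSocks):
--         first.setdefault(v, i)
--         last[v] = i
--     out = []
--     for i, v in enumerate(listOfSocks):
--         f, l = first[v], last[v]
--         if f == l:
--             out.append(-1)
--         elif i == f:
--             out.append(l)
--         else:
--             out.append(f)
--     return out
-- ===== Notes on version B (the rewrite author's own statement) =====
-- stated objective: alternative
-- what changed: A interleaves match bookkeeping with a single dict of pending first occurrences inside one loop; B instead records first- and last-occurrence tables in one pass and then computes every entry independently by a per-index formula (singleton -> -1, first occurrence -> last index, other occurrence -> first index).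
import Mathlib
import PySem

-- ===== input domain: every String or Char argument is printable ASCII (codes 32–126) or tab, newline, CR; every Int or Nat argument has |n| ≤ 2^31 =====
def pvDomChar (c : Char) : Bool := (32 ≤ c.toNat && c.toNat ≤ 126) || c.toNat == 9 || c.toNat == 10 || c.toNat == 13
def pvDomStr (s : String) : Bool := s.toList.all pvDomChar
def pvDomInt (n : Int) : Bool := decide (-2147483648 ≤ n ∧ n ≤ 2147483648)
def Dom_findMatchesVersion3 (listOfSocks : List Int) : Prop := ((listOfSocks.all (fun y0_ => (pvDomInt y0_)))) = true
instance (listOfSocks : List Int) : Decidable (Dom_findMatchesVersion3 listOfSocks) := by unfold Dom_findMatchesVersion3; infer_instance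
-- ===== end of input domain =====

-- B replaces A's interleaved first-occurrence bookkeeping by one pass recording first/last
-- occurrence tables and a second pass computing each entry by a per-index formula (objective: alternative).

-- ===== PORT A =====
-- one iteration of A's `for i in range(0, len(listOfSocks))` loop body; state st = (matches, dictOfSocks)
def aStep (listOfSocks : List Int) (st : List Int × PySem.Dict Int Int) (i : Int) :
    List Int × PySem.Dict Int Int :=
  if PySem.List.pyGetD st.1 i (-1) ≠ -1 then st          -- `if matches[i] != -1: continue` (i always in range)
  else if st.2.contains (PySem.List.pyGetD listOfSocks i 0) then
    -- `matches[dictOfSocks[listOfSocks[i]]] = i; matches[i] = dictOfSocks[listOfSocks[i]]` (all in range)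
    (PySem.List.pySetD
      (PySem.List.pySetD st.1 (st.2.getD (PySem.List.pyGetD listOfSocks i 0) 0) i)
      i (st.2.getD (PySem.List.pyGetD listOfSocks i 0) 0), st.2)
  else (st.1, st.2.insert (PySem.List.pyGetD listOfSocks i 0) i)

def findMatchesVersion3 (listOfSocks : List Int) : List Int :=
  ((PySem.List.pyRange 0 (PySem.List.len listOfSocks) 1).foldl (aStep listOfSocks)
    (listOfSocks.map (fun _ => (-1 : Int)), PySem.Dict.empty)).1

-- ===== PORT B =====
-- B's first pass: the (first, last) occurrence-index tables
def bTables (listOfSocks : List Int) : PySem.Dict Int Int × PySem.Dict Int Int :=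
  (PySem.List.enumerate listOfSocks).foldl
    (fun t p => (t.1.setdefault p.2 p.1, t.2.insert p.2 p.1))
    (PySem.Dict.empty, PySem.Dict.empty)

def findMatchesVersion3_alt (listOfSocks : List Int) : List Int :=
  let t := bTables listOfSocks
  (PySem.List.enumerate listOfSocks).map (fun p =>
    let f := t.1.getD p.2 0                              -- `first[v]` (key always present)
    let l := t.2.getD p.2 0                              -- `last[v]`
    if f = l then (-1 : Int) else if p.1 = f then l else f)

-- ===== PRECONDITION & SPEC =====
def Spec_findMatchesVersion3 (listOfSocks : List Int) (out : List Int) : Prop := out = findMatchesVersion3_alt listOfSocks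
instance (listOfSocks : List Int) (out : List Int) : Decidable (Spec_findMatchesVersion3 listOfSocks out) := by unfold Spec_findMatchesVersion3; infer_instance

-- ===== CLAIM (what is proved, stated in full; the proofs are below) =====
def Claim_equal_findMatchesVersion3 : Prop := ∀ (listOfSocks : List Int), Dom_findMatchesVersion3 listOfSocks → Spec_findMatchesVersion3 listOfSocks (findMatchesVersion3 listOfSocks)

-- ===== LEMMAS AND PROOFS =====

-- A's loop state after the whole loop (proof-only abbreviation; definitionally A's fold)
def runA (xs : List Int) : List Int × PySem.Dict Int Int :=
  (PySem.List.pyRange 0 (PySem.List.len xs) 1).foldl (aStep xs)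
    (xs.map (fun _ => (-1 : Int)), PySem.Dict.empty)

theorem runA_matches_eq (xs : List Int) : findMatchesVersion3 xs = (runA xs).1 := rfl

theorem aStep_length (xs : List Int) (st : List Int × PySem.Dict Int Int) (i : Int) :
    ((aStep xs st i).1).length = st.1.length := by
  unfold aStep
  split_ifs <;> simp [PySem.List.length_pySetD]

theorem aStep_dict_bound (xs : List Int) (st : List Int × PySem.Dict Int Int) (i N : Int)
    (h0 : 0 ≤ i) (hi : i < N)
    (hd : ∀ v j, st.2.get? v = some j → 0 ≤ j ∧ j < N) :
    ∀ v j, ((aStep xs st i).2).get? v = some j → 0 ≤ j ∧ j < N := by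
  unfold aStep
  split_ifs with hsk hc
  · exact hd
  · exact hd
  · intro v j hj
    rw [PySem.Dict.get?_insert] at hj
    split_ifs at hj with hv
    · cases hj; omega
    · exact hd v j hj

-- a key present in the dict has a value, and getD returns it
theorem dict_getD_of_contains (d : PySem.Dict Int Int) (v : Int) (hc : d.contains v = true) :
    ∃ j, d.get? v = some j ∧ d.getD v 0 = j := by
  rw [PySem.Dict.contains_eq_isSome_get?] at hc
  cases hj : d.get? v with
  | none => rw [hj] at hc; simp at hc
  | some j => exact ⟨j, rfl, PySem.Dict.getD_of_get?_eq_some d 0 hj⟩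

theorem aStep_append_step (xs : List Int) (x t : Int) (m : List Int) (d : PySem.Dict Int Int)
    (i : Int) (hm : m.length = xs.length) (h0 : 0 ≤ i) (hi : i < (xs.length : Int))
    (hd : ∀ v j, d.get? v = some j → 0 ≤ j ∧ j < (xs.length : Int)) :
    aStep (xs ++ [x]) (m ++ [t], d) i = ((aStep xs (m, d) i).1 ++ [t], (aStep xs (m, d) i).2) := by
  have hit : i.toNat < m.length := by omega
  have e1 : PySem.List.pyGetD (m ++ [t]) i (-1) = PySem.List.pyGetD m i (-1) := by
    rw [PySem.List.pyGetD_eq_getElem (m ++ [t]) (-1) h0 (by simp; omega),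
        PySem.List.pyGetD_eq_getElem m (-1) h0 (by omega)]
    exact List.getElem_append_left hit
  have e2 : PySem.List.pyGetD (xs ++ [x]) i 0 = PySem.List.pyGetD xs i 0 := by
    rw [PySem.List.pyGetD_eq_getElem (xs ++ [x]) 0 h0 (by simp; omega),
        PySem.List.pyGetD_eq_getElem xs 0 h0 (by omega)]
    exact List.getElem_append_left (by omega)
  unfold aStep
  simp only [e1, e2]
  split_ifs with hsk hc
  · rfl
  · -- matched branch: both sets land inside m
    obtain ⟨j, hj, hgd⟩ := dict_getD_of_contains d (PySem.List.pyGetD xs i 0) hc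
    have hjb := hd _ _ hj
    simp only [hgd]
    rw [PySem.List.pySetD_of_nonneg (m ++ [t]) i hjb.1,
        PySem.List.pySetD_of_nonneg m i hjb.1,
        List.set_append_left j.toNat i (by omega),
        PySem.List.pySetD_of_nonneg (m.set j.toNat i ++ [t]) j h0,
        PySem.List.pySetD_of_nonneg (m.set j.toNat i) j h0,
        List.set_append_left i.toNat j (by simp [List.length_set]; omega)]
  · rfl

theorem foldl_aStep_append (x : Int) (xs : List Int) (l : List Int) :
    ∀ (m : List Int) (t : Int) (d : PySem.Dict Int Int),
    m.length = xs.length →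
    (∀ i ∈ l, 0 ≤ i ∧ i < (xs.length : Int)) →
    (∀ v j, d.get? v = some j → 0 ≤ j ∧ j < (xs.length : Int)) →
    l.foldl (aStep (xs ++ [x])) (m ++ [t], d)
      = ((l.foldl (aStep xs) (m, d)).1 ++ [t], (l.foldl (aStep xs) (m, d)).2) := by
  induction l with
  | nil => intro m t d _ _ _; rfl
  | cons i l ih =>
    intro m t d hm hl hd
    have hi := hl i (by simp)
    have hstep := aStep_append_step xs x t m d i hm hi.1 hi.2 hd
    simp only [List.foldl_cons, hstep]
    have hnew : aStep xs (m, d) i = ((aStep xs (m, d) i).1, (aStep xs (m, d) i).2) := rfl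
    rw [show (aStep xs (m, d) i) = ((aStep xs (m, d) i).1, (aStep xs (m, d) i).2) from rfl]
    exact ih (aStep xs (m, d) i).1 t (aStep xs (m, d) i).2
      (by rw [← hm]; exact aStep_length xs (m, d) i)
      (fun j hj => hl j (by simp [hj]))
      (aStep_dict_bound xs (m, d) i (xs.length : Int) hi.1 hi.2 hd)

theorem runA_append (xs : List Int) (x : Int)
    (h1 : (runA xs).1.length = xs.length)
    (h2 : ∀ v, (runA xs).2.get? v = if v ∈ xs then some ((List.idxOf v xs : Int)) else none) :
    runA (xs ++ [x]) =
      if x ∈ xs then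
        ((runA xs).1.set (List.idxOf x xs) (xs.length : Int) ++ [(List.idxOf x xs : Int)],
          (runA xs).2)
      else ((runA xs).1 ++ [(-1 : Int)], (runA xs).2.insert x (xs.length : Int)) := by
  have hrange : PySem.List.pyRange 0 (PySem.List.len (xs ++ [x])) 1
      = PySem.List.pyRange 0 (xs.length : Int) 1 ++ [(xs.length : Int)] := by
    rw [PySem.List.len_eq]
    have h : ((xs ++ [x]).length : Int) = (xs.length : Int) + 1 := by simp
    rw [h]
    exact PySem.List.pyRange_one_succ_right (by positivity)
  have hmap : (xs ++ [x]).map (fun _ => (-1 : Int)) = xs.map (fun _ => (-1 : Int)) ++ [(-1 : Int)] :=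
    List.map_append ..
  have hpre := foldl_aStep_append x xs (PySem.List.pyRange 0 (xs.length : Int) 1)
      (xs.map (fun _ => (-1 : Int))) (-1) PySem.Dict.empty
      (by simp)
      (fun i hi => by rw [PySem.List.mem_pyRange_one] at hi; exact hi)
      (fun v j hj => by rw [PySem.Dict.get?_empty] at hj; cases hj)
  have hrw : (PySem.List.pyRange 0 (xs.length : Int) 1).foldl (aStep xs)
      (xs.map (fun _ => (-1 : Int)), PySem.Dict.empty) = runA xs := by
    unfold runA; rw [PySem.List.len_eq]
  have key : runA (xs ++ [x])
      = aStep (xs ++ [x]) ((runA xs).1 ++ [(-1 : Int)], (runA xs).2) (xs.length : Int) := by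
    conv_lhs => unfold runA
    rw [hrange, hmap, List.foldl_append, hpre, hrw]
    simp only [List.foldl_cons, List.foldl_nil]
  have ecnd : ¬ (PySem.List.pyGetD ((runA xs).1 ++ [(-1 : Int)]) (xs.length : Int) (-1) ≠ -1) := by
    rw [PySem.List.pyGetD_natCast, List.getD_eq_getElem _ _ (by simp [h1]),
        List.getElem_append_right (by omega)]
    simp [h1]
  have ev : PySem.List.pyGetD (xs ++ [x]) (xs.length : Int) 0 = x := by
    rw [PySem.List.pyGetD_natCast, List.getD_eq_getElem _ _ (by simp),
        List.getElem_append_right (by omega)]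
    simp
  rw [key]
  unfold aStep
  rw [if_neg ecnd, ev]
  by_cases hx : x ∈ xs
  · have hc : (runA xs).2.contains x = true := by
      rw [PySem.Dict.contains_eq_isSome_get?, h2 x, if_pos hx]; rfl
    have hgd : (runA xs).2.getD x 0 = (List.idxOf x xs : Int) := by
      exact PySem.Dict.getD_of_get?_eq_some _ 0 (by rw [h2 x, if_pos hx])
    have hidx : List.idxOf x xs < xs.length := List.idxOf_lt_length_of_mem hx
    rw [if_pos hc, if_pos hx, hgd]
    simp only [Prod.mk.injEq]
    refine ⟨?_, trivial⟩
    rw [PySem.List.pySetD_natCast ((runA xs).1 ++ [(-1 : Int)]),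
        List.set_append_left _ _ (by omega),
        PySem.List.pySetD_natCast,
        List.set_append_right _ _ (by simp [List.length_set, h1])]
    simp [h1]
  · have hc : (runA xs).2.contains x = false := by
      rw [PySem.Dict.contains_eq_isSome_get?, h2 x, if_neg hx]; rfl
    rw [if_neg (by simp [hc]), if_neg hx]

theorem bTables_append (xs : List Int) (x : Int) :
    bTables (xs ++ [x])
      = ((bTables xs).1.setdefault x (xs.length : Int), (bTables xs).2.insert x (xs.length : Int)) := by
  unfold bTables
  rw [PySem.List.enumerate_append, List.foldl_append]
  have h : PySem.List.enumerate [x] ((0 : Int) + (xs.length : Int)) = [((xs.length : Int), x)] := by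
    rw [PySem.List.enumerate_cons, PySem.List.enumerate_nil, zero_add]
  rw [h]
  rfl

-- minimality of the first-occurrence index
theorem getElem_ne_of_lt_idxOf (x : Int) (xs : List Int) (k : Nat) (hk : k < xs.length)
    (h : k < List.idxOf x xs) : xs[k] ≠ x := by
  induction xs generalizing k with
  | nil => simp at hk
  | cons a l ih =>
    rw [List.idxOf_cons] at h
    cases k with
    | zero =>
      intro hc
      simp only [List.getElem_cons_zero] at hc
      subst hc
      simp at h
    | succ k =>
      by_cases hax : a = x
      · subst hax; simp at h
      · have hbe : (a == x) = false := by simp [hax]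
        rw [hbe] at h
        simp only [cond_false] at h
        simpa using ih k (by simpa using hk) (by omega)

-- the invariant carried for B's `last` table
def LastInv (xs : List Int) (d : PySem.Dict Int Int) : Prop :=
  ∀ v : Int,
    (v ∈ xs → ∃ m : Nat, m < xs.length ∧ d.get? v = some (m : Int) ∧ xs.getD m 0 = v ∧
        ∀ k : Nat, m < k → k < xs.length → xs.getD k 0 ≠ v)
  ∧ (v ∉ xs → d.get? v = none)

theorem grand (xs : List Int) :
    (runA xs).1.length = xs.length
  ∧ (∀ v : Int, (runA xs).2.get? v = if v ∈ xs then some ((List.idxOf v xs : Int)) else none)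
  ∧ (∀ v : Int, (bTables xs).1.get? v = if v ∈ xs then some ((List.idxOf v xs : Int)) else none)
  ∧ LastInv xs (bTables xs).2
  ∧ (runA xs).1 = findMatchesVersion3_alt xs := by
  induction xs using List.reverseRecOn with
  | nil =>
    have hr : runA ([] : List Int) = ([], PySem.Dict.empty) := rfl
    have hb : bTables ([] : List Int) = (PySem.Dict.empty, PySem.Dict.empty) := rfl
    refine ⟨by rw [hr], ?_, ?_, ?_, rfl⟩
    · intro v; rw [hr]; simp [PySem.Dict.get?_empty]
    · intro v; rw [hb]; simp [PySem.Dict.get?_empty]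
    · intro v
      refine ⟨fun hv => by simp at hv, fun _ => by rw [hb]; exact PySem.Dict.get?_empty v⟩
  | append_singleton xs x ih =>
    obtain ⟨h1, h2, h3, h4, h5⟩ := ih
    have hRA := runA_append xs x h1 h2
    have hBT := bTables_append xs x
    have hB1 : (bTables (xs ++ [x])).1 = (bTables xs).1.setdefault x (xs.length : Int) := by
      rw [hBT]
    have hB2 : (bTables (xs ++ [x])).2 = (bTables xs).2.insert x (xs.length : Int) := by
      rw [hBT]
    -- c1 : length
    have c1 : (runA (xs ++ [x])).1.length = (xs ++ [x]).length := by
      rw [hRA]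
      by_cases hx : x ∈ xs
      · rw [if_pos hx]; simp [h1]
      · rw [if_neg hx]; simp [h1]
    -- c2 : A's dict is the first-occurrence table
    have c2 : ∀ v : Int, (runA (xs ++ [x])).2.get? v
        = if v ∈ xs ++ [x] then some ((List.idxOf v (xs ++ [x]) : Int)) else none := by
      intro v
      rw [hRA]
      by_cases hx : x ∈ xs
      · rw [if_pos hx, h2 v]
        by_cases hv : v ∈ xs
        · rw [if_pos hv, if_pos (by simp [hv]), List.idxOf_append, if_pos hv]
        · have hnv : v ∉ xs ++ [x] := by
            simp only [List.mem_append, List.mem_singleton, not_or]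
            exact ⟨hv, fun h => hv (h ▸ hx)⟩
          rw [if_neg hv, if_neg hnv]
      · rw [if_neg hx]
        rw [PySem.Dict.get?_insert]
        by_cases hvx : v = x
        · subst hvx
          rw [if_pos rfl, if_pos (by simp), List.idxOf_append, if_neg hx]
          simp
        · rw [if_neg hvx, h2 v]
          by_cases hv : v ∈ xs
          · rw [if_pos hv, if_pos (by simp [hv]), List.idxOf_append, if_pos hv]
          · rw [if_neg hv, if_neg (by simp [hv, hvx])]
    -- c3 : B's first table is the same first-occurrence table
    have c3 : ∀ v : Int, (bTables (xs ++ [x])).1.get? v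
        = if v ∈ xs ++ [x] then some ((List.idxOf v (xs ++ [x]) : Int)) else none := by
      intro v
      rw [hB1]
      by_cases hx : x ∈ xs
      · rw [PySem.Dict.setdefault_of_contains _ _
            (by rw [PySem.Dict.contains_eq_isSome_get?, h3 x, if_pos hx]; rfl), h3 v]
        by_cases hv : v ∈ xs
        · rw [if_pos hv, if_pos (by simp [hv]), List.idxOf_append, if_pos hv]
        · have hnv : v ∉ xs ++ [x] := by
            simp only [List.mem_append, List.mem_singleton, not_or]
            exact ⟨hv, fun h => hv (h ▸ hx)⟩
          rw [if_neg hv, if_neg hnv]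
      · rw [PySem.Dict.setdefault_of_not_contains _ _
            (by rw [PySem.Dict.contains_eq_isSome_get?, h3 x, if_neg hx]; rfl)]
        rw [PySem.Dict.get?_insert]
        by_cases hvx : v = x
        · subst hvx
          rw [if_pos rfl, if_pos (by simp), List.idxOf_append, if_neg hx]
          simp
        · rw [if_neg hvx, h3 v]
          by_cases hv : v ∈ xs
          · rw [if_pos hv, if_pos (by simp [hv]), List.idxOf_append, if_pos hv]
          · rw [if_neg hv, if_neg (by simp [hv, hvx])]
    -- c4 : B's last table invariant
    have c4 : LastInv (xs ++ [x]) (bTables (xs ++ [x])).2 := by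
      intro v
      rw [hB2]
      constructor
      · intro hv
        by_cases hvx : v = x
        · subst hvx
          refine ⟨xs.length, by simp, ?_, ?_, ?_⟩
          · rw [PySem.Dict.get?_insert, if_pos rfl]
          · rw [List.getD_eq_getElem _ _ (by simp), List.getElem_append_right (by omega)]
            simp
          · intro k hk1 hk2; simp at hk2; omega
        · have hv' : v ∈ xs := by
            rcases List.mem_append.mp hv with h | h
            · exact h
            · exact absurd (List.mem_singleton.mp h) hvx
          obtain ⟨m, hm1, hm2, hm3, hm4⟩ := (h4 v).1 hv'
          refine ⟨m, by simp; omega, ?_, ?_, ?_⟩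
          · rw [PySem.Dict.get?_insert_of_ne _ _ hvx]; exact hm2
          · rw [List.getD_append _ _ _ _ hm1]; exact hm3
          · intro k hk1 hk2
            simp only [List.length_append, List.length_cons, List.length_nil] at hk2
            by_cases hkn : k < xs.length
            · rw [List.getD_append _ _ _ _ hkn]; exact hm4 k hk1 hkn
            · have hkeq : k = xs.length := by omega
              subst hkeq
              rw [List.getD_eq_getElem _ _ (by simp), List.getElem_append_right (by omega)]
              simpa using fun h => hvx h.symm
      · intro hv
        have hvx : v ≠ x := fun h => hv (by simp [h])
        have hv' : v ∉ xs := fun h => hv (by simp [h])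
        rw [PySem.Dict.get?_insert_of_ne _ _ hvx]
        exact (h4 v).2 hv'
    refine ⟨c1, c2, c3, c4, ?_⟩
    -- c5 : the final lists agree
    have henum : PySem.List.enumerate (xs ++ [x])
        = PySem.List.enumerate xs ++ [((xs.length : Int), x)] := by
      rw [PySem.List.enumerate_append]
      rw [show PySem.List.enumerate [x] ((0 : Int) + (xs.length : Int))
            = [((xs.length : Int), x)] from by
        rw [PySem.List.enumerate_cons, PySem.List.enumerate_nil, zero_add]]
    rw [hRA]
    simp only [findMatchesVersion3_alt]
    rw [henum, List.map_append]
    by_cases hx : x ∈ xs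
    · have hF : (bTables (xs ++ [x])).1 = (bTables xs).1 := by
        rw [hB1, PySem.Dict.setdefault_of_contains _ _
          (by rw [PySem.Dict.contains_eq_isSome_get?, h3 x, if_pos hx]; rfl)]
      have hidx : List.idxOf x xs < xs.length := List.idxOf_lt_length_of_mem hx
      have e1 : (bTables (xs ++ [x])).1.getD x 0 = ((List.idxOf x xs : Int)) := by
        rw [hF]
        exact PySem.Dict.getD_of_get?_eq_some _ 0 (by rw [h3 x, if_pos hx])
      have e2 : (bTables (xs ++ [x])).2.getD x 0 = (xs.length : Int) := by
        rw [hB2]; exact PySem.Dict.getD_insert_self _ _ _ _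
      rw [if_pos hx, h5]
      simp only [findMatchesVersion3_alt]
      congr 1
      · -- the prefix: a single set at the first occurrence
        obtain ⟨m, hm1, hm2, hm3, hm4⟩ := (h4 x).1 hx
        have eL : (bTables xs).2.getD x 0 = (m : Int) :=
          PySem.Dict.getD_of_get?_eq_some _ 0 hm2
        have eF : (bTables xs).1.getD x 0 = ((List.idxOf x xs : Int)) :=
          PySem.Dict.getD_of_get?_eq_some _ 0 (by rw [h3 x, if_pos hx])
        apply List.ext_getElem
        · simp [PySem.List.length_enumerate]
        · intro k h₁ h₂
          have hk : k < xs.length := by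
            simpa [PySem.List.length_enumerate] using h₂
          rw [List.getElem_map, List.getElem_set, List.getElem_map,
              PySem.List.getElem_enumerate]
          dsimp only
          simp only [zero_add]
          by_cases hkx : xs[k] = x
          · rw [hkx, e1, e2, eF, eL]
            by_cases hke : k = List.idxOf x xs
            · split_ifs <;> omega
            · have hgne : List.idxOf x xs ≠ m := by
                intro he
                rcases Nat.lt_or_ge k (List.idxOf x xs) with hlt | hge
                · exact getElem_ne_of_lt_idxOf x xs k hk hlt hkx
                · exact hm4 k (by omega) hk (by rw [List.getD_eq_getElem _ _ hk]; exact hkx)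
              split_ifs <;> omega
          · have hkne : List.idxOf x xs ≠ k := by
              intro he
              subst he
              exact hkx (List.getElem_idxOf hidx)
            rw [if_neg hkne]
            have f1 : (bTables (xs ++ [x])).1.getD xs[k] 0 = (bTables xs).1.getD xs[k] 0 := by
              rw [hF]
            have f2 : (bTables (xs ++ [x])).2.getD xs[k] 0 = (bTables xs).2.getD xs[k] 0 := by
              rw [hB2]; exact PySem.Dict.getD_insert_of_ne _ _ _ hkx
            rw [f1, f2]
      · -- the appended element points back to the first occurrence
        simp only [List.map_cons, List.map_nil]
        rw [e1, e2]
        rw [if_neg (by omega), if_neg (by omega)]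
    · have hF : (bTables (xs ++ [x])).1 = (bTables xs).1.insert x (xs.length : Int) := by
        rw [hB1, PySem.Dict.setdefault_of_not_contains _ _
          (by rw [PySem.Dict.contains_eq_isSome_get?, h3 x, if_neg hx]; rfl)]
      rw [if_neg hx, h5]
      simp only [findMatchesVersion3_alt]
      congr 1
      · -- none of the old entries change
        apply List.map_congr_left
        intro p hp
        obtain ⟨k, hk, rfl⟩ := (PySem.List.mem_enumerate_iff xs 0 p).mp hp
        have hvx : xs[k] ≠ x := fun h => hx (h ▸ xs.getElem_mem hk)
        have f1 : (bTables xs).1.getD xs[k] 0 = (bTables (xs ++ [x])).1.getD xs[k] 0 := by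
          rw [hF, PySem.Dict.getD_insert_of_ne _ _ _ hvx]
        have f2 : (bTables xs).2.getD xs[k] 0 = (bTables (xs ++ [x])).2.getD xs[k] 0 := by
          rw [hB2, PySem.Dict.getD_insert_of_ne _ _ _ hvx]
        simp only [f1, f2]
      · -- the appended element is a fresh singleton: stays -1
        have e1 : (bTables (xs ++ [x])).1.getD x 0 = (xs.length : Int) := by
          rw [hF]; exact PySem.Dict.getD_insert_self _ _ _ _
        have e2 : (bTables (xs ++ [x])).2.getD x 0 = (xs.length : Int) := by
          rw [hB2]; exact PySem.Dict.getD_insert_self _ _ _ _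
        simp only [List.map_cons, List.map_nil]
        rw [e1, e2, if_pos rfl]

-- ===== VERDICT (by name: the statement is the Claim_ definition above) =====
theorem findMatchesVersion3_spec : Claim_equal_findMatchesVersion3 := by
  intro xs _
  show findMatchesVersion3 xs = findMatchesVersion3_alt xs
  rw [runA_matches_eq]
  exact (grand xs).2.2.2.2
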